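-- pv_equiv track=rewrite | github.com/SamJim0729/BDSE34-G3-final-project | src/language_models/newmortgage.py | fromat_money
-- ===== SOURCE A (Python) =====
-- def fromat_money(int_a):
--     str_a = str(int_a)
--     result = ''
--     count = 0
--     unit = ["萬","億","兆","京","垓"]
--     while (len(str_a)-1)//4 > 0:
--         result = unit[count] + str_a[-4:] + result
--         str_a = str_a[:-4]
--         count += 1
--     result = str_a + result
--     return result
-- ===== SOURCE B (Python) =====
-- def fromat_money(int_a):
--     s = str(int_a)
--     n = len(s)
--     g = (n - 1) // 4
--     if g == 0:
--         return s
--     unit = ["萬", "億", "兆", "京", "垓"]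
--     out = []
--     for idx, ch in enumerate(s):
--         rem = n - idx
--         if rem % 4 == 0 and rem <= 4 * g:
--             out.append(unit[rem // 4 - 1])
--         out.append(ch)
--     return ''.join(out)
-- ===== Notes on version B (the rewrite author's own statement) =====
-- stated objective: alternative
-- what changed: Replaces A's while-loop that repeatedly slices off the last four digits and rebuilds the string from the right with a single left-to-right pass that derives marker positions arithmetically from the remaining length and joins once.
import Mathlib
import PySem

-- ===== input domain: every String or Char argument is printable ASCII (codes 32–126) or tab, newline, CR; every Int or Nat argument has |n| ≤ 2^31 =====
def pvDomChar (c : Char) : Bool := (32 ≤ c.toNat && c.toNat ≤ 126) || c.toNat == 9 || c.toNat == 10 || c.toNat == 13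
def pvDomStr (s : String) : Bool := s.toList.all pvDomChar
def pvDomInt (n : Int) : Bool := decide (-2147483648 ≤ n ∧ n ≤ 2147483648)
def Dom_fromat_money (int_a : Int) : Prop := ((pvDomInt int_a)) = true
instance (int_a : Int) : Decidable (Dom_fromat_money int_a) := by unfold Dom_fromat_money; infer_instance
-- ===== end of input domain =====

-- B replaces A's right-to-left slicing loop by one arithmetic left-to-right pass (alternative decomposition, same return value).

-- ===== PORT A =====
-- the shared literal constant `unit = ["萬","億","兆","京","垓"]` both Pythons define
def pvUnit : List (List Char) := [['萬'], ['億'], ['兆'], ['京'], ['垓']]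

-- A's while loop; `unit[count]` ported as getD (exact while count < 5, which holds on Dom: ≤ 11 digits ⇒ count ≤ 2)
def pvLoopA (str_a result : List Char) (count : Nat) : List Char :=
  if h : 0 < PySem.Int.floordiv ((str_a.length : Int) - 1) 4 then
    pvLoopA (PySem.List.slice str_a none (some (-4)))
            (pvUnit.getD count [] ++ PySem.List.slice str_a (some (-4)) none ++ result)
            (count + 1)
  else
    str_a ++ result
termination_by str_a.length
decreasing_by
  rw [PySem.List.slice_to_neg_ofNat str_a 4 (by omega)]
  rw [PySem.Int.floordiv_eq_ediv_of_pos (by norm_num)] at h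
  simp only [List.length_take]
  omega

def fromat_money (int_a : Int) : String :=
  String.ofList (pvLoopA (PySem.Int.toChars int_a) [] 0)

-- ===== PORT B =====
-- B's single enumerate pass; `unit[rem//4-1]` ported as pyGetD (exact while the index is < 5, which holds on Dom)
def fromat_money_alt (int_a : Int) : String :=
  let s := PySem.Int.toChars int_a
  let n : Int := s.length
  let g : Int := PySem.Int.floordiv (n - 1) 4
  if g = 0 then String.ofList s
  else
    String.ofList ((PySem.List.enumerate s).foldl (fun acc p =>
      let rem : Int := n - p.1
      let acc' := if PySem.Int.mod rem 4 = 0 ∧ rem ≤ 4 * g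
                  then acc ++ PySem.List.pyGetD pvUnit (PySem.Int.floordiv rem 4 - 1) []
                  else acc
      acc' ++ [p.2]) [])

-- ===== PRECONDITION & SPEC =====
def Spec_fromat_money (int_a : Int) (out : String) : Prop := out = fromat_money_alt int_a
instance (int_a : Int) (out : String) : Decidable (Spec_fromat_money int_a out) := by unfold Spec_fromat_money; infer_instance

-- ===== CLAIM (what is proved, stated in full; the proofs are below) =====
def Claim_equal_fromat_money : Prop := ∀ (int_a : Int), Dom_fromat_money int_a → Spec_fromat_money int_a (fromat_money int_a)

-- ===== LEMMAS AND PROOFS =====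

-- common shape of both programs' result on the digit string s, with unit offset c
def pvBody (s : List Char) (c : Nat) : List Char :=
  if s.length ≤ 4 then s
  else pvBody (s.take (s.length - 4)) (c + 1) ++ pvUnit.getD c [] ++ s.drop (s.length - 4)
termination_by s.length
decreasing_by simp only [List.length_take]; omega

-- the contribution of one enumerated character in B's pass (unit offset c)
def pvMark (n g : Int) (c : Nat) (p : Int × Char) : List Char :=
  (if PySem.Int.mod (n - p.1) 4 = 0 ∧ n - p.1 ≤ 4 * g
   then PySem.List.pyGetD pvUnit (PySem.Int.floordiv (n - p.1) 4 - 1 + (c : Int)) []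
   else []) ++ [p.2]

theorem pvLoopA_eq_body (m : Nat) :
    ∀ (s result : List Char) (c : Nat), s.length ≤ m → pvLoopA s result c = pvBody s c ++ result := by
  induction m with
  | zero =>
    intro s result c hm
    have hs : s = [] := List.length_eq_zero_iff.mp (by omega)
    subst hs
    rw [pvLoopA, pvBody]
    norm_num [PySem.Int.floordiv_eq_ediv_of_pos (by norm_num : (0:Int) < 4)]
  | succ m ih =>
    intro s result c hm
    rw [pvLoopA, pvBody]
    by_cases h : 0 < PySem.Int.floordiv ((s.length : Int) - 1) 4
    · have h5 : 5 ≤ s.length := by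
        rw [PySem.Int.floordiv_eq_ediv_of_pos (by norm_num)] at h; omega
      rw [dif_pos h, if_neg (by omega)]
      rw [PySem.List.slice_to_neg_ofNat s 4 (by omega),
          PySem.List.slice_from_neg_ofNat s 4 (by omega)]
      rw [ih _ _ _ (by simp only [List.length_take]; omega)]
      simp [List.append_assoc]
    · have h4 : s.length ≤ 4 := by
        rw [PySem.Int.floordiv_eq_ediv_of_pos (by norm_num)] at h
        omega
      rw [dif_neg h, if_pos h4]

theorem pvLen4 {α : Type} (l : List α) (h : l.length = 4) :
    ∃ a b c d, l = [a, b, c, d] := by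
  match l, h with
  | [a, b, c, d], _ => exact ⟨a, b, c, d, rfl⟩

theorem pvQpart (a b c' d : Char) (n g : Int) (c : Nat) (s0 : Int)
    (h4 : n - s0 = 4) (hg : 1 ≤ g) :
    (PySem.List.enumerate [a, b, c', d] s0).flatMap (pvMark n g c)
      = pvUnit.getD c [] ++ [a, b, c', d] := by
  have e1 : n - s0 = 4 := h4
  have e2 : n - (s0 + 1) = 3 := by omega
  have e3 : n - (s0 + 1 + 1) = 2 := by omega
  have e4 : n - (s0 + 1 + 1 + 1) = 1 := by omega
  simp only [PySem.List.enumerate_cons, PySem.List.enumerate_nil, List.flatMap_cons,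
    List.flatMap_nil, pvMark, e1, e2, e3, e4]
  rw [if_pos ⟨by decide, by omega⟩, if_neg (fun h => absurd h.1 (by decide)),
      if_neg (fun h => absurd h.1 (by decide)), if_neg (fun h => absurd h.1 (by decide))]
  have hi : PySem.Int.floordiv 4 4 - 1 + (c : Int) = ((c : Nat) : Int) := by
    rw [show PySem.Int.floordiv 4 4 = 1 from by decide]; omega
  rw [hi, PySem.List.pyGetD_natCast]
  simp

theorem pvFlatMap_eq_body (m : Nat) :
    ∀ (s : List Char) (c : Nat), s.length ≤ m →
      (PySem.List.enumerate s).flatMap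
        (pvMark (s.length : Int) (PySem.Int.floordiv ((s.length : Int) - 1) 4) c)
      = pvBody s c := by
  induction m with
  | zero =>
    intro s c hm
    have hs : s = [] := List.length_eq_zero_iff.mp (by omega)
    subst hs
    rw [pvBody]
    simp [PySem.List.enumerate]
  | succ m ih =>
    intro s c hm
    by_cases h4 : s.length ≤ 4
    · rw [pvBody, if_pos h4]
      have this1 : ∀ p ∈ PySem.List.enumerate s,
          pvMark (s.length : Int) (PySem.Int.floordiv ((s.length : Int) - 1) 4) c p = [p.2] := by
        intro p hp
        rw [PySem.List.mem_enumerate_iff] at hp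
        obtain ⟨k, hk, rfl⟩ := hp
        unfold pvMark
        rw [if_neg]
        · simp
        · rintro ⟨hmod, hle⟩
          rw [PySem.Int.mod_eq_emod_of_pos (by norm_num)] at hmod
          rw [PySem.Int.floordiv_eq_ediv_of_pos (by norm_num)] at hle
          omega
      rw [List.flatMap_congr this1, ← List.map_eq_flatMap]
      exact PySem.List.map_snd_enumerate s 0
    · rw [pvBody, if_neg h4]
      have hsplit : s = s.take (s.length - 4) ++ s.drop (s.length - 4) :=
        (List.take_append_drop _ s).symm
      set p := s.take (s.length - 4) with hp
      set q := s.drop (s.length - 4) with hq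
      have hpl : p.length = s.length - 4 := by simp [hp]
      have hql : q.length = 4 := by simp [hq]; omega
      have hn : (s.length : Int) = (p.length : Int) + 4 := by omega
      have hgpos : (1 : Int) ≤ PySem.Int.floordiv ((s.length : Int) - 1) 4 := by
        rw [PySem.Int.floordiv_eq_ediv_of_pos (by norm_num)]; omega
      have hgpos' : (1 : Int) ≤ ((s.length : Int) - 1) / 4 := by omega
      have hgp : ((s.length : Int) - 1) / 4 - 1 = ((p.length : Int) - 1) / 4 := by omega
      have henum : PySem.List.enumerate s
          = PySem.List.enumerate p 0 ++ PySem.List.enumerate q (0 + (p.length : Int)) := by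
        conv_lhs => rw [hsplit]
        exact PySem.List.enumerate_append p q 0
      rw [henum, List.flatMap_append]
      obtain ⟨a, b, c', d, hq4⟩ := pvLen4 q hql
      -- the q-part produces the unit marker followed by the last four characters
      have hqpart : (PySem.List.enumerate q (0 + (p.length : Int))).flatMap
          (pvMark (s.length : Int) (PySem.Int.floordiv ((s.length : Int) - 1) 4) c)
          = pvUnit.getD c [] ++ q := by
        rw [hq4]
        exact pvQpart a b c' d _ _ c _ (by omega) hgpos
      -- on the prefix the pass is the same pass with length 4 smaller and offset c+1
      have hppart : ∀ pr ∈ PySem.List.enumerate p 0,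
          pvMark (s.length : Int) (PySem.Int.floordiv ((s.length : Int) - 1) 4) c pr
          = pvMark (p.length : Int) (PySem.Int.floordiv ((p.length : Int) - 1) 4) (c + 1) pr := by
        intro pr hpr
        rw [PySem.List.mem_enumerate_iff] at hpr
        obtain ⟨k, hk, rfl⟩ := hpr
        unfold pvMark
        simp only [zero_add]
        simp only [PySem.Int.mod_eq_emod_of_pos (by norm_num : (0:Int) < 4),
          PySem.Int.floordiv_eq_ediv_of_pos (by norm_num : (0:Int) < 4)]
        by_cases hc : ((p.length : Int) - (k : Int)) % 4 = 0 ∧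
            (p.length : Int) - (k : Int) ≤ 4 * (((p.length : Int) - 1) / 4)
        · rw [if_pos, if_pos hc]
          · have hidx : ((s.length : Int) - (k : Int)) / 4 - 1 + (c : Int)
                = ((p.length : Int) - (k : Int)) / 4 - 1 + ((c + 1 : Nat) : Int) := by
              push_cast
              omega
            rw [hidx]
          · exact ⟨by omega, by omega⟩
        · rw [if_neg, if_neg hc]
          exact fun hcn => hc ⟨by omega, by omega⟩
      rw [List.flatMap_congr hppart, ih p (c + 1) (by omega), hqpart]
      rw [List.append_assoc]

-- ===== VERDICT (by name: the statement is the Claim_ definition above) =====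
theorem fromat_money_spec : Claim_equal_fromat_money := by
  intro int_a _
  unfold Spec_fromat_money fromat_money fromat_money_alt
  rw [pvLoopA_eq_body (PySem.Int.toChars int_a).length _ [] 0 le_rfl, List.append_nil]
  set s := PySem.Int.toChars int_a with hs
  simp only []
  by_cases hg : PySem.Int.floordiv ((s.length : Int) - 1) 4 = 0
  · rw [if_pos hg, pvBody, if_pos]
    rw [PySem.Int.floordiv_eq_ediv_of_pos (by norm_num)] at hg
    omega
  · rw [if_neg hg]
    have hfold : ∀ (acc : List Char),
        (PySem.List.enumerate s).foldl (fun acc p =>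
          (if PySem.Int.mod (((s.length : Int)) - p.1) 4 = 0 ∧
              ((s.length : Int)) - p.1 ≤ 4 * PySem.Int.floordiv (((s.length : Int)) - 1) 4
           then acc ++ PySem.List.pyGetD pvUnit (PySem.Int.floordiv (((s.length : Int)) - p.1) 4 - 1) []
           else acc) ++ [p.2]) acc
        = acc ++ (PySem.List.enumerate s).flatMap
            (pvMark (s.length : Int) (PySem.Int.floordiv ((s.length : Int) - 1) 4) 0) := by
      intro acc
      rw [← PySem.List.foldl_append_eq_flatMap]
      congr 1
      funext a p
      unfold pvMark
      by_cases hc : PySem.Int.mod (((s.length : Int)) - p.1) 4 = 0 ∧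
          ((s.length : Int)) - p.1 ≤ 4 * PySem.Int.floordiv (((s.length : Int)) - 1) 4
      · rw [if_pos hc, if_pos hc]
        simp
      · rw [if_neg hc, if_neg hc]
        simp
    rw [hfold, List.nil_append, pvFlatMap_eq_body s.length s 0 le_rfl]
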